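-- pv_equiv track=rewrite | github.com/34127chi/text_similarity | sim_multiclassify/sent_sim.py | overfit
-- ===== SOURCE A (Python) =====
-- def overfit(dev_acc):
--     n = len(dev_acc)
--     if n < 5:
--         return False
--     for i in range(n-4, n):
--         if dev_acc[i] > dev_acc[i-1]:
--             return False
--     return True
-- ===== SOURCE B (Python) =====
-- def overfit(dev_acc):
--     if len(dev_acc) < 5:
--         return False
--     tail = dev_acc[-5:]
--     return tail == sorted(tail, reverse=True)
-- ===== Notes on version B (the rewrite author's own statement) =====
-- stated objective: idiomatic
-- what changed: Replaced the explicit index loop over the last four adjacent pairs with slicing the last five values and comparing the slice with its descending stable sort.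
import Mathlib
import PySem

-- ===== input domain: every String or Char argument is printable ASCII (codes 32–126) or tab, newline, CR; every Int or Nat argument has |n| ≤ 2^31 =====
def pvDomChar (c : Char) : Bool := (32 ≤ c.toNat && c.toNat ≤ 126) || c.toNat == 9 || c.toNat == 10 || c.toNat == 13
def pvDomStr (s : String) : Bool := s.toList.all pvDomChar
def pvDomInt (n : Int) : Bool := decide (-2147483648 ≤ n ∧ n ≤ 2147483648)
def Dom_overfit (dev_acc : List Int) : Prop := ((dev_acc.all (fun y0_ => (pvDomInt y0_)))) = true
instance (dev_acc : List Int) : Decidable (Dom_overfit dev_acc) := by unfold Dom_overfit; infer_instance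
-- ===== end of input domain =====

-- B replaces A's index loop over the last four adjacent pairs by slicing the last
-- five values and comparing the slice with its descending stable sort (idiomatic).

-- ===== PORT A =====
def overfitLoop (dev_acc : List Int) : List Int → Bool
  | [] => true
  | i :: rest =>
    if PySem.List.pyGetD dev_acc i 0 > PySem.List.pyGetD dev_acc (i - 1) 0 then false
    else overfitLoop dev_acc rest

def overfit (dev_acc : List Int) : Bool :=
  let n : Int := dev_acc.length
  if n < 5 then false
  else overfitLoop dev_acc (PySem.List.pyRange (n - 4) n 1)

-- ===== PORT B =====
def overfit_alt (dev_acc : List Int) : Bool :=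
  if (dev_acc.length : Int) < 5 then false
  else
    let tail := PySem.List.slice dev_acc (some (-5)) none
    tail == PySem.List.sorted tail (fun x => x) true

-- ===== PRECONDITION & SPEC =====
def Spec_overfit (dev_acc : List Int) (out : Bool) : Prop := out = overfit_alt dev_acc
instance (dev_acc : List Int) (out : Bool) : Decidable (Spec_overfit dev_acc out) := by unfold Spec_overfit; infer_instance

-- ===== CLAIM (what is proved, stated in full; the proofs are below) =====
def Claim_equal_overfit : Prop := ∀ (dev_acc : List Int), Dom_overfit dev_acc → Spec_overfit dev_acc (overfit dev_acc)

-- ===== LEMMAS AND PROOFS =====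

theorem overfit_main (xs : List Int) : overfit xs = overfit_alt xs := by
  unfold overfit overfit_alt
  by_cases h : ((xs.length : Int) < 5)
  · simp [h]
  · simp only [h, if_false]
    have h5 : 5 ≤ xs.length := by omega
    have hslice : PySem.List.slice xs (some (-5)) none = xs.drop (xs.length - 5) :=
      PySem.List.slice_from_neg_ofNat xs 5 (by omega)
    obtain ⟨a, b, c, d, e, ht⟩ :
        ∃ a b c d e, xs.drop (xs.length - 5) = [a, b, c, d, e] := by
      have hl : (xs.drop (xs.length - 5)).length = 5 := by
        rw [List.length_drop]; omega
      obtain ⟨a, t1, h1⟩ := List.exists_of_length_succ _ (by rw [hl])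
      rw [h1] at hl; simp at hl
      obtain ⟨b, t2, h2⟩ := List.exists_of_length_succ _ (by rw [hl])
      rw [h2] at hl; simp at hl
      obtain ⟨c, t3, h3⟩ := List.exists_of_length_succ _ (by rw [hl])
      rw [h3] at hl; simp at hl
      obtain ⟨d, t4, h4⟩ := List.exists_of_length_succ _ (by rw [hl])
      rw [h4] at hl; simp at hl
      obtain ⟨e, t5, h5'⟩ := List.exists_of_length_succ _ (by rw [hl])
      rw [h5'] at hl; simp at hl
      exact ⟨a, b, c, d, e, by rw [h1, h2, h3, h4, h5', hl]⟩
    -- element facts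
    have hget : ∀ (j : Nat), j < 5 → PySem.List.pyGetD xs ((xs.length : Int) - 5 + (j : Int)) 0
        = ([a, b, c, d, e].getD j 0 : Int) := by
      intro j hj
      rw [PySem.List.pyGetD_of_nonneg xs 0 (by omega)]
      have hidx : (((xs.length : Int) - 5 + (j : Int))).toNat = xs.length - 5 + j := by omega
      have h2 : xs[xs.length - 5 + j]? = some ([a,b,c,d,e].getD j 0) := by
        rw [← List.getElem?_drop, ht]
        interval_cases j <;> rfl
      rw [hidx, List.getD_eq_getElem?_getD, h2]
      rfl
    have hr : PySem.List.pyRange ((xs.length:Int) - 4) (xs.length:Int) 1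
        = [(xs.length:Int)-4, (xs.length:Int)-3, (xs.length:Int)-2, (xs.length:Int)-1] := by
      rw [PySem.List.pyRange_one_cons (by omega), PySem.List.pyRange_one_cons (by omega),
          PySem.List.pyRange_one_cons (by omega), PySem.List.pyRange_one_cons (by omega),
          PySem.List.pyRange_one_eq_nil (by omega)]
      norm_num
      refine ⟨by ring, by ring, by ring⟩
    have ga : PySem.List.pyGetD xs ((xs.length:Int) - 4 - 1) 0 = a := by
      have h' : ((xs.length:Int) - 4 - 1) = (xs.length:Int) - 5 + ((0:Nat):Int) := by push_cast; ring
      rw [h']; simpa using hget 0 (by omega)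
    have gb : PySem.List.pyGetD xs ((xs.length:Int) - 4) 0 = b := by
      have h' : ((xs.length:Int) - 4) = (xs.length:Int) - 5 + ((1:Nat):Int) := by push_cast; ring
      rw [h']; simpa using hget 1 (by omega)
    have gb' : PySem.List.pyGetD xs ((xs.length:Int) - 3 - 1) 0 = b := by
      have h' : ((xs.length:Int) - 3 - 1) = (xs.length:Int) - 5 + ((1:Nat):Int) := by push_cast; ring
      rw [h']; simpa using hget 1 (by omega)
    have gc : PySem.List.pyGetD xs ((xs.length:Int) - 3) 0 = c := by
      have h' : ((xs.length:Int) - 3) = (xs.length:Int) - 5 + ((2:Nat):Int) := by push_cast; ring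
      rw [h']; simpa using hget 2 (by omega)
    have gc' : PySem.List.pyGetD xs ((xs.length:Int) - 2 - 1) 0 = c := by
      have h' : ((xs.length:Int) - 2 - 1) = (xs.length:Int) - 5 + ((2:Nat):Int) := by push_cast; ring
      rw [h']; simpa using hget 2 (by omega)
    have gd : PySem.List.pyGetD xs ((xs.length:Int) - 2) 0 = d := by
      have h' : ((xs.length:Int) - 2) = (xs.length:Int) - 5 + ((3:Nat):Int) := by push_cast; ring
      rw [h']; simpa using hget 3 (by omega)
    have gd' : PySem.List.pyGetD xs ((xs.length:Int) - 1 - 1) 0 = d := by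
      have h' : ((xs.length:Int) - 1 - 1) = (xs.length:Int) - 5 + ((3:Nat):Int) := by push_cast; ring
      rw [h']; simpa using hget 3 (by omega)
    have ge : PySem.List.pyGetD xs ((xs.length:Int) - 1) 0 = e := by
      have h' : ((xs.length:Int) - 1) = (xs.length:Int) - 5 + ((4:Nat):Int) := by push_cast; ring
      rw [h']; simpa using hget 4 (by omega)
    have hB : (([a,b,c,d,e] : List Int) == PySem.List.sorted [a,b,c,d,e] (fun x => x) true)
        = decide (b ≤ a ∧ c ≤ b ∧ d ≤ c ∧ e ≤ d) := by
      by_cases hord : b ≤ a ∧ c ≤ b ∧ d ≤ c ∧ e ≤ d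
      · obtain ⟨o1, o2, o3, o4⟩ := hord
        have hp : List.Pairwise (fun x y : Int => (fun x : Int => x) y ≤ (fun x : Int => x) x)
            [a, b, c, d, e] := by
          simp only [List.pairwise_cons, List.mem_cons,
            List.not_mem_nil, false_implies, forall_eq_or_imp,
            List.Pairwise.nil, and_true, forall_const]
          omega
        rw [PySem.List.sorted_rev_eq_self_of_pairwise _ _ hp]
        simp [o1, o2, o3, o4]
      · have hne : ([a,b,c,d,e] : List Int) ≠ PySem.List.sorted [a,b,c,d,e] (fun x => x) true := by
          intro heq
          have hp := PySem.List.sorted_pairwise_rev ([a,b,c,d,e] : List Int) (fun x => x)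
          rw [← heq] at hp
          simp only [List.pairwise_cons, List.mem_cons,
            List.not_mem_nil, false_implies, forall_eq_or_imp,
            List.Pairwise.nil, and_true, forall_const] at hp
          refine hord ⟨?_, ?_, ?_, ?_⟩ <;> omega
        simp [hne, hord]
    rw [hr, hslice, ht]
    simp only [overfitLoop]
    rw [ga, gb, gb', gc, gc', gd, gd', ge, hB]
    split_ifs with h1 h2 h3 h4 <;> simp <;> omega


-- ===== VERDICT (by name: the statement is the Claim_ definition above) =====
theorem overfit_spec : Claim_equal_overfit := by
  intro xs _
  exact overfit_main xs
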